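-- pv_equiv track=rewrite | github.com/yqiuu/spectuner | meteor/spectral_data/molecules.py | decompose_exclude_list
-- ===== SOURCE A (Python) =====
-- def decompose_exclude_list(exclude_list):
--     """Decompose an exclude_lsit, e.g.
--
--     [CH3OH, HNCO;v=0, C2H3CN, H2C-13-CHCN;v=0;]
--     -> [[CH3OH, C2H3CN], [HNCO;v=0], [H2C-13-CHCN;v=0;]]
--     """
--     exclude_list_new = [[], [], []]
--     for name in exclude_list:
--         num = len(name.split(";"))
--         if num == 1:
--             exclude_list_new[0].append(name)
--         elif num == 2:
--             exclude_list_new[1].append(name)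
--         else:
--             exclude_list_new[2].append(name)
--     return exclude_list_new
-- ===== SOURCE B (Python) =====
-- def decompose_exclude_list(exclude_list):
--     """Decompose an exclude_lsit, e.g.
--
--     [CH3OH, HNCO;v=0, C2H3CN, H2C-13-CHCN;v=0;]
--     -> [[CH3OH, C2H3CN], [HNCO;v=0], [H2C-13-CHCN;v=0;]]
--     """
--     return [
--         [name for name in exclude_list if name.count(";") == 0],
--         [name for name in exclude_list if name.count(";") == 1],
--         [name for name in exclude_list if name.count(";") >= 2],
--     ]
-- ===== Notes on version B (the rewrite author's own statement) =====
-- stated objective: simpler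
-- what changed: Replaces the single simultaneous-partition loop with indexed appends by three independent filtering comprehensions, one per bucket, classifying by name.count(';') instead of len(name.split(';')).
import Mathlib
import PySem

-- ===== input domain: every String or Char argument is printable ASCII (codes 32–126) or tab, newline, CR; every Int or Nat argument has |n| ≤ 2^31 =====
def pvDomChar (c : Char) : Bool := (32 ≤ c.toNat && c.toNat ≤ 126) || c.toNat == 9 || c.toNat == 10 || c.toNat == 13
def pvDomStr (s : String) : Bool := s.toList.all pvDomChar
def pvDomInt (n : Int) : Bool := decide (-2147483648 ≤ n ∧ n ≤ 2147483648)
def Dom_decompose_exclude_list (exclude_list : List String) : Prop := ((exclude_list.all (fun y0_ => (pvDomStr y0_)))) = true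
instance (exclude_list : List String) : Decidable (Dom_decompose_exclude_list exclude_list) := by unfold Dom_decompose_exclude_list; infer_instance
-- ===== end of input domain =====

-- B replaces A's single partition loop by three independent filters keyed on name.count(';'): simpler decomposition, same cost.

-- ===== PORT A =====
-- one pass; the three buckets of exclude_list_new are the components of the accumulator triple
def decompose_exclude_list (exclude_list : List String) : List (List String) :=
  let r := exclude_list.foldl
    (fun (acc : List String × List String × List String) name =>
      let num := (PySem.Chars.splitOn name.toList ";".toList).length
      if num == 1 then (acc.1 ++ [name], acc.2.1, acc.2.2)
      else if num == 2 then (acc.1, acc.2.1 ++ [name], acc.2.2)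
      else (acc.1, acc.2.1, acc.2.2 ++ [name]))
    ([], [], [])
  [r.1, r.2.1, r.2.2]

-- ===== PORT B =====
def decompose_exclude_list_alt (exclude_list : List String) : List (List String) :=
  [ exclude_list.filter (fun name => PySem.Str.count name ";" == 0),
    exclude_list.filter (fun name => PySem.Str.count name ";" == 1),
    exclude_list.filter (fun name => 2 ≤ PySem.Str.count name ";") ]

-- ===== PRECONDITION & SPEC =====
def Spec_decompose_exclude_list (exclude_list : List String) (out : List (List String)) : Prop := out = decompose_exclude_list_alt exclude_list
instance (exclude_list : List String) (out : List (List String)) : Decidable (Spec_decompose_exclude_list exclude_list out) := by unfold Spec_decompose_exclude_list; infer_instance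

-- ===== CLAIM (what is proved, stated in full; the proofs are below) =====
def Claim_equal_decompose_exclude_list : Prop := ∀ (exclude_list : List String), Dom_decompose_exclude_list exclude_list → Spec_decompose_exclude_list exclude_list (decompose_exclude_list exclude_list)

-- ===== LEMMAS AND PROOFS =====

-- count.go only adds to its accumulator
theorem pv_countGo_shift (sub : List Char) (fuel : Nat) :
    ∀ (l : List Char) (acc : Nat),
      PySem.Chars.count.go sub fuel l acc = acc + PySem.Chars.count.go sub fuel l 0 := by
  induction fuel with
  | zero => intro l acc; simp [PySem.Chars.count.go]
  | succ f ih =>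
    intro l acc
    cases l with
    | nil => simp [PySem.Chars.count.go]
    | cons c rest =>
      simp only [PySem.Chars.count.go]
      split
      · rw [ih _ (acc + 1), ih _ (0 + 1)]; omega
      · exact ih rest acc

-- the number of pieces split(';') produces is one more than the occurrence count
theorem pv_splitGo_count (sub : List Char) (hsub : sub ≠ []) (fuel₁ : Nat) :
    ∀ (l cur : List Char) (acc : List (List Char)) (fuel₂ : Nat),
      l.length ≤ fuel₁ → l.length ≤ fuel₂ →
      (PySem.Chars.splitOn.go sub fuel₁ l cur acc).length
        = acc.length + 1 + PySem.Chars.count.go sub fuel₂ l 0 := by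
  have hsl : 1 ≤ sub.length := by cases sub <;> simp_all
  induction fuel₁ with
  | zero =>
    intro l cur acc fuel₂ h1 h2
    have : l = [] := by cases l <;> simp_all
    subst this
    cases fuel₂ <;> simp [PySem.Chars.splitOn.go, PySem.Chars.count.go]
  | succ f ih =>
    intro l cur acc fuel₂ h1 h2
    cases l with
    | nil =>
      cases fuel₂ <;> simp [PySem.Chars.splitOn.go, PySem.Chars.count.go]
    | cons c rest =>
      cases fuel₂ with
      | zero => simp at h2
      | succ f₂ =>
        simp only [PySem.Chars.splitOn.go, PySem.Chars.count.go]
        split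
        · rename_i hpre
          have hlen : (List.drop sub.length (c :: rest)).length ≤ rest.length := by
            simp only [List.length_drop]; simp; omega
          rw [ih _ _ _ f₂ (by simp at h1 ⊢; omega) (by simp at h2 ⊢; omega)]
          have hs := pv_countGo_shift sub f₂ (List.drop sub.length (c :: rest)) (0 + 1)
          simp only [List.length_cons] at *
          omega
        · rw [ih rest _ _ f₂ (by simp at h1 ⊢; omega) (by simp at h2 ⊢; omega)]

theorem pv_split_len_eq_count (s : List Char) (sub : List Char) (hsub : sub ≠ []) :
    (PySem.Chars.splitOn s sub).length = PySem.Chars.count s sub + 1 := by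
  unfold PySem.Chars.splitOn PySem.Chars.count
  rw [if_neg (by simpa using hsub)]
  rw [pv_splitGo_count sub hsub (s.length + 1) s [] [] s.length (by omega) le_rfl]
  simp; omega

-- A's foldl over the triple accumulator is B's three filters, prefixed by the accumulator
theorem pv_fold_eq_filters (l : List String) :
    ∀ (a b c : List String),
      l.foldl
        (fun (acc : List String × List String × List String) name =>
          let num := (PySem.Chars.splitOn name.toList ";".toList).length
          if num == 1 then (acc.1 ++ [name], acc.2.1, acc.2.2)
          else if num == 2 then (acc.1, acc.2.1 ++ [name], acc.2.2)
          else (acc.1, acc.2.1, acc.2.2 ++ [name]))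
        (a, b, c)
      = (a ++ l.filter (fun name => PySem.Str.count name ";" == 0),
         b ++ l.filter (fun name => PySem.Str.count name ";" == 1),
         c ++ l.filter (fun name => 2 ≤ PySem.Str.count name ";")) := by
  induction l with
  | nil => intro a b c; simp
  | cons x xs ih =>
    intro a b c
    have hx : (PySem.Chars.splitOn x.toList [';']).length
        = PySem.Chars.count x.toList [';'] + 1 :=
      pv_split_len_eq_count _ _ (by decide)
    rw [List.foldl_cons]
    by_cases h0 : PySem.Chars.count x.toList [';'] = 0
    · have hstep : (let num := (PySem.Chars.splitOn x.toList ";".toList).length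
        if num == 1 then (a ++ [x], b, c)
        else if num == 2 then (a, b ++ [x], c)
        else (a, b, c ++ [x])) = (a ++ [x], b, c) := by
        simp [hx, h0]
      rw [hstep, ih]
      simp [h0]
    · by_cases h1 : PySem.Chars.count x.toList [';'] = 1
      · have hstep : (let num := (PySem.Chars.splitOn x.toList ";".toList).length
          if num == 1 then (a ++ [x], b, c)
          else if num == 2 then (a, b ++ [x], c)
          else (a, b, c ++ [x])) = (a, b ++ [x], c) := by
          simp [hx, h1]
        rw [hstep, ih]
        simp [h1]
      · have h2 : 2 ≤ PySem.Chars.count x.toList [';'] := by omega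
        have hstep : (let num := (PySem.Chars.splitOn x.toList ";".toList).length
          if num == 1 then (a ++ [x], b, c)
          else if num == 2 then (a, b ++ [x], c)
          else (a, b, c ++ [x])) = (a, b, c ++ [x]) := by
          simp [hx, h0, h1]
        rw [hstep, ih]
        simp [h0, h1, h2]

-- ===== VERDICT (by name: the statement is the Claim_ definition above) =====
theorem decompose_exclude_list_spec : Claim_equal_decompose_exclude_list := by
  intro l _
  unfold Spec_decompose_exclude_list decompose_exclude_list decompose_exclude_list_alt
  rw [pv_fold_eq_filters l [] [] []]
  simp
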